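-- pv_equiv track=rewrite | github.com/Byorks/PTI-2S-SENAC-PP | controle_estoque/gerador_codigo_fonte/exportar_codigo.py | _md_fence_for
-- ===== SOURCE A (Python) =====
-- def _md_fence_for(text: str) -> str:
--     max_run = 0
--     run = 0
--     for ch in text:
--         if ch == "`":
--             run += 1
--             max_run = max(max_run, run)
--         else:
--             run = 0
--     return "`" * max(3, max_run + 1)
-- ===== SOURCE B (Python) =====
-- def _md_fence_for(text: str) -> str:
--     fence = "```"
--     while fence in text:
--         fence += "`"
--     return fence
-- ===== Notes on version B (the rewrite author's own statement) =====
-- stated objective: simpler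
-- what changed: Instead of scanning characters to track the longest backtick run, B starts from a candidate fence of three backticks and grows it while it still occurs as a substring of the text; no run counting at all.
import Mathlib
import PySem

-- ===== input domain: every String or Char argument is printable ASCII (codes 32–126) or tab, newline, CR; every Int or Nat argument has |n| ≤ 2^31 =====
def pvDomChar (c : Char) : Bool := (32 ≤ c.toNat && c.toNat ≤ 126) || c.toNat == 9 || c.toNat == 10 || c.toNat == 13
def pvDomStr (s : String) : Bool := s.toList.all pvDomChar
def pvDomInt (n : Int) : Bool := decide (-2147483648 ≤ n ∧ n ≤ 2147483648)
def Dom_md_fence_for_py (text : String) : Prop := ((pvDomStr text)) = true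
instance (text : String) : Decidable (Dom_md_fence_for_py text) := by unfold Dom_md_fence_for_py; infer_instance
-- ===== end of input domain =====

-- B replaces A's longest-backtick-run scan by a probe-and-grow loop: start from "```"
-- and append one backtick while the candidate fence still occurs in the text (simpler; same result).

-- ===== PORT A =====
-- loop state (max_run, run), one step per character, exactly as A's for-loop
def md_fence_for_py (text : String) : String :=
  let s := text.toList.foldl
    (fun (st : Nat × Nat) ch =>
      if ch = '`' then (max st.1 (st.2 + 1), st.2 + 1) else (st.1, 0))
    (0, 0)
  String.ofList (List.replicate (max 3 (s.1 + 1)) '`')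

-- ===== PORT B =====
-- 'while fence in text: fence += "`"'; 'in' is PySem.Chars.isIn; terminates because a
-- substring is never longer than the text.
def mdGrow (t : List Char) (fence : List Char) : List Char :=
  if h : PySem.Chars.isIn fence t = true then mdGrow t (fence ++ ['`']) else fence
termination_by t.length + 1 - fence.length
decreasing_by
  have : fence <:+: t := (PySem.Chars.isIn_iff_infix fence t).mp h
  have := this.sublist.length_le
  simp only [List.length_append, List.length_singleton]
  omega

def md_fence_for_py_alt (text : String) : String :=
  String.ofList (mdGrow text.toList ['`', '`', '`'])

-- ===== PRECONDITION & SPEC =====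
def Spec_md_fence_for_py (text : String) (out : String) : Prop := out = md_fence_for_py_alt text
instance (text : String) (out : String) : Decidable (Spec_md_fence_for_py text out) := by unfold Spec_md_fence_for_py; infer_instance

-- ===== CLAIM (what is proved, stated in full; the proofs are below) =====
def Claim_equal_md_fence_for_py : Prop := ∀ (text : String), Dom_md_fence_for_py text → Spec_md_fence_for_py text (md_fence_for_py text)

-- ===== LEMMAS AND PROOFS =====

-- mdG r l: the largest run-value A's loop records while scanning l with current run r
def mdG : Nat → List Char → Nat
  | _, [] => 0
  | r, c :: cs => if c = '`' then max (r + 1) (mdG (r + 1) cs) else mdG 0 cs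

theorem mdLoop_fst : ∀ (l : List Char) (m r : Nat),
    (l.foldl (fun (st : Nat × Nat) ch =>
        if ch = '`' then (max st.1 (st.2 + 1), st.2 + 1) else (st.1, 0)) (m, r)).1
      = max m (mdG r l) := by
  intro l
  induction l with
  | nil => intro m r; simp [mdG]
  | cons c cs ih =>
    intro m r
    by_cases h : c = '`'
    · simp only [List.foldl, h, if_true, mdG]
      rw [ih]
      omega
    · simp only [List.foldl, h, if_false, mdG]
      rw [ih]

-- replicate-prefix of replicate ++ separated tail: only as long as the leading block
theorem rep_prefix_iff : ∀ (r k : Nat) (c : Char) (cs : List Char), c ≠ '`' →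
    (List.replicate k '`' <+: List.replicate r '`' ++ c :: cs ↔ k ≤ r) := by
  intro r
  induction r with
  | zero =>
    intro k c cs hc
    cases k with
    | zero => simp
    | succ k =>
      simp only [List.replicate_succ, List.replicate_zero, List.nil_append]
      constructor
      · intro h
        rcases List.cons_prefix_cons.mp h with ⟨h1, _⟩
        exact absurd h1.symm hc
      · omega
  | succ r ih =>
    intro k c cs hc
    cases k with
    | zero => simp
    | succ k =>
      simp only [List.replicate_succ, List.cons_append, List.cons_prefix_cons,
        true_and]
      rw [ih k c cs hc]
      omega

theorem rep_infix_rep_iff (k r : Nat) (c : Char) :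
    List.replicate k c <:+: List.replicate r c ↔ k ≤ r := by
  constructor
  · intro h
    have := h.sublist.length_le
    simpa using this
  · intro h
    refine ⟨List.replicate (r - k) c, [], ?_⟩
    rw [List.append_nil, ← List.replicate_add]
    congr 1
    omega

-- the separator lemma: an all-backtick substring of (r backticks ++ c :: cs), c ≠ '`',
-- lies in the leading block or in cs
theorem rep_infix_split : ∀ (r k : Nat) (c : Char) (cs : List Char), c ≠ '`' → 1 ≤ k →
    (List.replicate k '`' <:+: List.replicate r '`' ++ c :: cs ↔
      k ≤ r ∨ List.replicate k '`' <:+: cs) := by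
  intro r
  induction r with
  | zero =>
    intro k c cs hc hk
    simp only [List.replicate_zero, List.nil_append, List.infix_cons_iff]
    constructor
    · rintro (h | h)
      · exact absurd ((rep_prefix_iff 0 k c cs hc).mp (by simpa using h)) (by omega)
      · exact Or.inr h
    · rintro (h | h)
      · omega
      · exact Or.inr h
  | succ r ih =>
    intro k c cs hc hk
    rw [List.replicate_succ, List.cons_append, List.infix_cons_iff]
    rw [ih k c cs hc hk]
    constructor
    · rintro (h | h | h)
      · exact Or.inl ((rep_prefix_iff (r + 1) k c cs hc).mp (by
          simpa [List.replicate_succ] using h))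
      · exact Or.inl (by omega)
      · exact Or.inr h
    · rintro (h | h)
      · rcases Nat.lt_or_ge r k with h' | h'
        · exact Or.inl (by
            have := (rep_prefix_iff (r + 1) k c cs hc).mpr h
            simpa [List.replicate_succ] using this)
        · exact Or.inr (Or.inl h')
      · exact Or.inr (Or.inr h)

-- a run of k backticks occurs in (r backticks ++ l) iff k ≤ max r (mdG r l)
theorem rep_infix_iff_mdG : ∀ (l : List Char) (r k : Nat), 1 ≤ k →
    (List.replicate k '`' <:+: List.replicate r '`' ++ l ↔ k ≤ max r (mdG r l)) := by
  intro l
  induction l with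
  | nil =>
    intro r k hk
    simp only [List.append_nil, mdG]
    rw [rep_infix_rep_iff]
    omega
  | cons c cs ih =>
    intro r k hk
    by_cases h : c = '`'
    · subst h
      have : List.replicate r '`' ++ '`' :: cs = List.replicate (r + 1) '`' ++ cs := by
        simp [List.replicate_succ']
      rw [this, ih (r + 1) k hk]
      simp only [mdG, if_true]
      omega
    · rw [rep_infix_split r k c cs h hk]
      simp only [mdG, h, if_false]
      have := ih 0 k hk
      simp only [List.replicate_zero, List.nil_append] at this
      rw [this]
      omega

-- mdGrow from a pure-backtick fence lands on max k (maxRun + 1)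
theorem mdGrow_rep : ∀ (d : Nat) (t : List Char) (k : Nat), 1 ≤ k →
    mdG 0 t + 1 - k ≤ d →
    mdGrow t (List.replicate k '`') = List.replicate (max k (mdG 0 t + 1)) '`' := by
  intro d
  induction d with
  | zero =>
    intro t k hk hd
    rw [mdGrow]
    have hni : ¬ (List.replicate k '`' <:+: t) := by
      have := rep_infix_iff_mdG t 0 k hk
      simp only [List.replicate_zero, List.nil_append] at this
      rw [this]
      omega
    rw [dif_neg (by
      intro h
      exact hni ((PySem.Chars.isIn_iff_infix _ _).mp h))]
    congr 1
    omega
  | succ d ih =>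
    intro t k hk hd
    rw [mdGrow]
    have hiff := rep_infix_iff_mdG t 0 k hk
    simp only [List.replicate_zero, List.nil_append] at hiff
    by_cases h : PySem.Chars.isIn (List.replicate k '`') t = true
    · have hin : k ≤ mdG 0 t := by
        have := hiff.mp ((PySem.Chars.isIn_iff_infix _ _).mp h)
        omega
      rw [dif_pos h]
      have : List.replicate k '`' ++ ['`'] = List.replicate (k + 1) '`' := by
        simp [List.replicate_succ']
      rw [this, ih t (k + 1) (by omega) (by omega)]
      congr 1
      omega
    · rw [dif_neg h]
      have : ¬ k ≤ mdG 0 t := fun hle =>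
        h ((PySem.Chars.isIn_iff_infix _ _).mpr (hiff.mpr hle))
      congr 1
      omega

-- ===== VERDICT (by name: the statement is the Claim_ definition above) =====
theorem md_fence_for_py_spec : Claim_equal_md_fence_for_py := by
  intro text _
  unfold Spec_md_fence_for_py md_fence_for_py md_fence_for_py_alt
  have hA := mdLoop_fst text.toList 0 0
  have hB := mdGrow_rep (mdG 0 text.toList + 1) text.toList 3 (by omega) (by omega)
  have h3 : (['`', '`', '`'] : List Char) = List.replicate 3 '`' := by decide
  simp only [h3, hA, hB, Nat.zero_max]
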